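-- pv_equiv track=rewrite | github.com/Faisal-Khan-Tushar/Software-now-assignment-2 | question2_chapter2_first_portion.py | separate_string
-- ===== SOURCE A (Python) =====
-- def separate_string(input_string):
--     # Creating two empty substrings: one for numbers and one for letters
--     number_substring = ""
--     letter_substring = ""
--
--     # Iterating through the input string to check each character
--     for char in input_string:
--         # Checking if the character is a digit
--         if char.isdigit():
--             number_substring += char
--         # Checking if the character is a letter
--         elif char.isalpha():
--             letter_substring += char
--
--     return number_substring, letter_substring
-- ===== SOURCE B (Python) =====
-- def separate_string(input_string):
--     # Stable sort puts digits (isalpha == False) before letters (True),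
--     # preserving relative order within each class; then split at the digit count.
--     kept = sorted((c for c in input_string if c.isdigit() or c.isalpha()),
--                   key=str.isalpha)
--     k = len(kept) - sum(map(str.isalpha, kept))
--     return ''.join(kept[:k]), ''.join(kept[k:])
-- ===== Notes on version B (the rewrite author's own statement) =====
-- stated objective: alternative
-- what changed: Replaces A's single branching accumulator loop with a filter + stable sort on the boolean key isalpha (digits sort before letters, stability preserves relative order) followed by a split at the digit count.
import Mathlib
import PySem

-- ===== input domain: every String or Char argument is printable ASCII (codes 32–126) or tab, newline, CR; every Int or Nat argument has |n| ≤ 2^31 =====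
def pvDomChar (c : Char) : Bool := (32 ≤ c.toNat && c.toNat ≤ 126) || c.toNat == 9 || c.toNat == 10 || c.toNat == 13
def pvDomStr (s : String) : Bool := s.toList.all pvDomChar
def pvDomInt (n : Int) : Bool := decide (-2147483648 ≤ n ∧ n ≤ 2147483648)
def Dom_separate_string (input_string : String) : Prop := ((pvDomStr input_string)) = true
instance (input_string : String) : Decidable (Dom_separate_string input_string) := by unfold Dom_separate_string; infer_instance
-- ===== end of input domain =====

-- B replaces A's single branching accumulator loop with filter + stable sort on the
-- boolean key isalpha followed by a split at the digit count (alternative algorithm, same output).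
-- ===== PORT A =====
-- A: one pass over the characters, appending each char to the digit or letter accumulator.
def separate_string (input_string : String) : String × String :=
  let p := input_string.toList.foldl
    (fun (acc : List Char × List Char) char =>
      if PySem.Chars.isdigit char then (acc.1 ++ [char], acc.2)
      else if PySem.Chars.isalpha char then (acc.1, acc.2 ++ [char])
      else acc)
    ([], [])
  (String.ofList p.1, String.ofList p.2)

-- ===== PORT B =====
-- B: keep only digits/letters, stable-sort by the boolean key isalpha
-- (digits first, order preserved within each class), split at the digit count.
def separate_string_alt (input_string : String) : String × String :=
  let kept := PySem.List.sorted
    (input_string.toList.filter (fun c => PySem.Chars.isdigit c || PySem.Chars.isalpha c))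
    (fun c => PySem.Chars.isalpha c) false
  let k : Int := (kept.length : Int)
    - kept.foldl (fun (acc : Int) c => acc + (if PySem.Chars.isalpha c then 1 else 0)) 0
  (String.ofList (PySem.List.slice kept none (some k)),
   String.ofList (PySem.List.slice kept (some k) none))

-- ===== PRECONDITION & SPEC =====
def Spec_separate_string (input_string : String) (out : String × String) : Prop := out = separate_string_alt input_string
instance (input_string : String) (out : String × String) : Decidable (Spec_separate_string input_string out) := by unfold Spec_separate_string; infer_instance

-- ===== CLAIM (what is proved, stated in full; the proofs are below) =====
def Claim_equal_separate_string : Prop := ∀ (input_string : String), Dom_separate_string input_string → Spec_separate_string input_string (separate_string input_string)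

-- ===== LEMMAS AND PROOFS =====

lemma dig_not_alpha (c : Char) (h : PySem.Chars.isdigit c = true) :
    PySem.Chars.isalpha c = false := by
  simp [PySem.Chars.isdigit, PySem.Chars.isalpha, PySem.Chars.isupper,
        PySem.Chars.islower, Char.le_def, UInt32.le_iff_toNat_le] at *
  omega

-- A's loop computes the two filters.
lemma loop_split (l : List Char) (a b : List Char) :
    l.foldl
      (fun (acc : List Char × List Char) char =>
        if PySem.Chars.isdigit char then (acc.1 ++ [char], acc.2)
        else if PySem.Chars.isalpha char then (acc.1, acc.2 ++ [char])
        else acc)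
      (a, b)
    = (a ++ l.filter PySem.Chars.isdigit, b ++ l.filter PySem.Chars.isalpha) := by
  induction l generalizing a b with
  | nil => simp
  | cons c t ih =>
    by_cases hd : PySem.Chars.isdigit c = true
    · simp [List.foldl_cons, hd, dig_not_alpha c hd, ih]
    · by_cases ha : PySem.Chars.isalpha c = true
      · simp [List.foldl_cons, hd, ha, ih]
      · simp [List.foldl_cons, hd, ha, ih]

-- Inserting a false-key element into a (false-keys ++ true-keys) list places it between the blocks.
lemma insertBy_mid (key : Char → Bool) (x : Char) (A B : List Char)
    (hx : key x = false) (hA : ∀ a ∈ A, key a = false) (hB : ∀ b ∈ B, key b = true) :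
    PySem.List.insertBy (fun a b => decide (key a < key b)) x (A ++ B) = A ++ x :: B := by
  induction A with
  | nil =>
    cases B with
    | nil => simp [PySem.List.insertBy]
    | cons b bs =>
      have hb := hB b (by simp)
      simp [PySem.List.insertBy, hx, hb]
  | cons a as ih =>
    have ha := hA a (by simp)
    have ih' := ih (fun y hy => hA y (List.mem_cons_of_mem _ hy))
    simp [PySem.List.insertBy, hx, ha, Bool.lt_iff] at ih' ⊢
    exact ih'

-- Inserting a true-key element goes to the very end.
lemma insertBy_last (key : Char → Bool) (x : Char) (l : List Char) (hx : key x = true) :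
    PySem.List.insertBy (fun a b => decide (key a < key b)) x l = l ++ [x] := by
  apply PySem.List.insertBy_of_forall_not_before
  intro y _
  simp [hx, Bool.lt_iff]

-- The insertion-sort fold keeps the list stably partitioned by the boolean key.
lemma foldl_insertBy_partition (key : Char → Bool) (l A B : List Char)
    (hA : ∀ a ∈ A, key a = false) (hB : ∀ b ∈ B, key b = true) :
    l.foldl (fun acc x => PySem.List.insertBy (fun a b => decide (key a < key b)) x acc) (A ++ B)
    = (A ++ l.filter (fun c => !key c)) ++ (B ++ l.filter key) := by
  induction l generalizing A B with
  | nil => simp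
  | cons c t ih =>
    by_cases hc : key c = true
    · have hB' : ∀ b ∈ B ++ [c], key b = true := by
        intro y hy
        rcases List.mem_append.1 hy with h | h
        · exact hB y h
        · simp at h; subst h; exact hc
      rw [List.foldl_cons, insertBy_last key c (A ++ B) hc, List.append_assoc,
          ih A (B ++ [c]) hA hB']
      simp [hc, List.append_assoc]
    · have hc' : key c = false := by simpa using hc
      have hA' : ∀ a ∈ A ++ [c], key a = false := by
        intro y hy
        rcases List.mem_append.1 hy with h | h
        · exact hA y h
        · simp at h; subst h; exact hc'
      rw [List.foldl_cons, insertBy_mid key c A B hc' hA hB,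
          show A ++ c :: B = (A ++ [c]) ++ B by simp, ih (A ++ [c]) B hA' hB]
      simp [hc', List.append_assoc]

-- Stable sort on a boolean key = stable partition.
lemma sorted_bool_partition (key : Char → Bool) (l : List Char) :
    PySem.List.sorted l key false = l.filter (fun c => !key c) ++ l.filter key := by
  have h := foldl_insertBy_partition key l [] [] (by simp) (by simp)
  simpa [PySem.List.sorted] using h

lemma foldl_count (p : Char → Bool) (l : List Char) (i : Int) :
    l.foldl (fun (acc : Int) c => acc + (if p c then 1 else 0)) i = i + (l.countP p : Int) := by
  induction l generalizing i with
  | nil => simp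
  | cons c t ih =>
    by_cases hc : p c = true
    · simp [List.foldl_cons, hc, ih]
      ring
    · simp [List.foldl_cons, hc, ih]

-- ===== VERDICT (by name: the statement is the Claim_ definition above) =====
theorem separate_string_spec : Claim_equal_separate_string := by
  intro s _
  unfold Spec_separate_string separate_string separate_string_alt
  have hkept : (s.toList.filter (fun c => PySem.Chars.isdigit c || PySem.Chars.isalpha c)).filter
      (fun c => !PySem.Chars.isalpha c) = s.toList.filter PySem.Chars.isdigit := by
    rw [List.filter_filter]
    apply List.filter_congr
    intro c _
    by_cases hd : PySem.Chars.isdigit c = true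
    · simp [hd, dig_not_alpha c hd]
    · by_cases ha : PySem.Chars.isalpha c = true <;> simp [hd, ha]
  have hkeptA : (s.toList.filter (fun c => PySem.Chars.isdigit c || PySem.Chars.isalpha c)).filter
      (fun c => PySem.Chars.isalpha c) = s.toList.filter PySem.Chars.isalpha := by
    rw [List.filter_filter]
    apply List.filter_congr
    intro c _
    by_cases hd : PySem.Chars.isdigit c = true
    · simp [hd, dig_not_alpha c hd]
    · by_cases ha : PySem.Chars.isalpha c = true <;> simp [hd, ha]
  have hs := sorted_bool_partition (fun c => PySem.Chars.isalpha c)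
      (s.toList.filter (fun c => PySem.Chars.isdigit c || PySem.Chars.isalpha c))
  rw [hkept, hkeptA] at hs
  set D := s.toList.filter PySem.Chars.isdigit with hD
  set Al := s.toList.filter PySem.Chars.isalpha with hAl
  simp only [hs, loop_split, List.nil_append]
  have hcount : (D ++ Al).countP (fun c => PySem.Chars.isalpha c) = Al.length := by
    rw [List.countP_append]
    have h1 : D.countP (fun c => PySem.Chars.isalpha c) = 0 := by
      rw [List.countP_eq_zero]
      intro c hc
      exact by simpa using dig_not_alpha c (List.of_mem_filter hc)
    have h2 : Al.countP (fun c => PySem.Chars.isalpha c) = Al.length := by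
      rw [List.countP_eq_length]
      intro c hc
      exact List.of_mem_filter hc
    omega
  have hk : ((D ++ Al).length : Int)
      - (D ++ Al).foldl (fun (acc : Int) c => acc + (if PySem.Chars.isalpha c then 1 else 0)) 0
      = (D.length : Int) := by
    rw [foldl_count, hcount]
    push_cast [List.length_append]
    ring
  rw [hk, PySem.List.slice_to_natCast, PySem.List.slice_from_natCast,
      List.take_left, List.drop_left]
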